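-- pv_equiv track=rewrite | github.com/jellyfishing2346/TIP-class-assignments | Week-03/hackerrank/advanced-version-b/process_elements_letters.py | process_elements
-- ===== SOURCE A (Python) =====
-- from collections import deque
--
-- def process_elements(elements):
--     queue = deque()
--     stack = []
--     for element in elements:
--         queue.append(element)
--     while queue:
--         item = queue.popleft()
--         stack.append(item)
--         if len(stack) % 2 == 0 and queue:
--             stack.pop()
--     return list(stack)
-- ===== SOURCE B (Python) =====
-- def process_elements(elements):
--     elements = list(elements)
--     if not elements:
--         return []
--     if len(elements) == 1:
--         return [elements[0]]
--     return [elements[0], elements[-1]]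
-- ===== Notes on version B (the rewrite author's own statement) =====
-- stated objective: simpler
-- what changed: Replaces A's deque/stack simulation (push each element, pop on even stack length) with a direct closed-form branch returning [first] / [first, last] by indexing.
import Mathlib
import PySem

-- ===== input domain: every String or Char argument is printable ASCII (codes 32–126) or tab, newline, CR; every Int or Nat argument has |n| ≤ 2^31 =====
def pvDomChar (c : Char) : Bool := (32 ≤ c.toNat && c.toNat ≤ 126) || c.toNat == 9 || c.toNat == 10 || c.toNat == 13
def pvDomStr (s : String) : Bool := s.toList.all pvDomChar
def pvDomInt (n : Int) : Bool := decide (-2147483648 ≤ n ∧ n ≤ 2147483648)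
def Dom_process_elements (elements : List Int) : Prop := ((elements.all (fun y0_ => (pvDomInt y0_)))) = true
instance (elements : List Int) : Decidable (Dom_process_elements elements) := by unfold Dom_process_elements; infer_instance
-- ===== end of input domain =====

-- B replaces A's deque/stack simulation with a closed-form first/last branch (simpler).

-- ===== PORT A =====
-- the while-loop of A: queue = remaining deque, stack = accumulated list
def pvLoopA (queue : List Int) (stack : List Int) : List Int :=
  match queue with
  | [] => stack
  | item :: rest =>
      let stack' := stack ++ [item]
      let stack'' := if stack'.length % 2 == 0 && !rest.isEmpty then stack'.dropLast else stack'
      pvLoopA rest stack''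

def process_elements (elements : List Int) : List Int :=
  -- for element in elements: queue.append(element)  ⇒ queue = elements; stack = []
  pvLoopA elements []

-- ===== PORT B =====
def process_elements_alt (elements : List Int) : List Int :=
  if elements.isEmpty then []
  else if elements.length == 1 then [elements.headI]
  else [elements.headI, elements.getLast!]

-- ===== PRECONDITION & SPEC =====
def Spec_process_elements (elements : List Int) (out : List Int) : Prop := out = process_elements_alt elements
instance (elements : List Int) (out : List Int) : Decidable (Spec_process_elements elements out) := by unfold Spec_process_elements; infer_instance

-- ===== CLAIM (what is proved, stated in full; the proofs are below) =====
def Claim_equal_process_elements : Prop := ∀ (elements : List Int), Dom_process_elements elements → Spec_process_elements elements (process_elements elements)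

-- ===== LEMMAS AND PROOFS =====

-- invariant of A's loop after the first element: stack stays [f] until the last element
theorem pvLoopA_singleton (q : List Int) : ∀ (x f : Int), pvLoopA (x :: q) [f] = [f, (x :: q).getLast (by simp)] := by
  induction q with
  | nil => intro x f; simp [pvLoopA]
  | cons y rest ih =>
      intro x f
      rw [pvLoopA]
      simp only [List.isEmpty_cons]
      norm_num
      rw [ih y f]

theorem process_elements_spec : Claim_equal_process_elements := by
  intro elements _
  unfold Spec_process_elements process_elements process_elements_alt
  match elements with
  | [] => rfl
  | [f] => simp [pvLoopA]
  | f :: x :: rest =>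
      rw [pvLoopA]
      simp only [List.nil_append, List.length_singleton]
      norm_num
      rw [pvLoopA_singleton rest x f]
      simp [List.getLast?_eq_some_getLast]
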